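-- pv_equiv track=rewrite | github.com/pypi-data/pypi-mirror-379 | packages/mcp-ambari-api/mcp_ambari_api-3.3.2.tar.gz/mcp_ambari_api-3.3.2/src/mcp_ambari_api/metrics_catalog.py | canonicalize_app_id
-- ===== SOURCE A (Python) =====
-- from typing import Dict, Iterable, List, Optional, Set, Tuple
--
-- APP_SYNONYMS: Dict[str, Tuple[str, ...]] = {
--     "HOST": ("host", "hardware", "system"),
--     "ambari_server": ("ambari", "server", "ambari_server"),
--     "namenode": ("namenode", "hdfs", "nn", "name node"),
--     "datanode": ("datanode", "dn", "data node"),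
--     "nodemanager": ("nodemanager", "nm", "node manager"),
--     "resourcemanager": ("resourcemanager", "rm", "resource manager", "yarn"),
-- }
--
-- def canonicalize_app_id(app_id: Optional[str]) -> Optional[str]:
--     """Return the canonical AMS appId (case-insensitive synonym support)."""
--
--     if not app_id:
--         return None
--
--     normalized = app_id.strip()
--     if not normalized:
--         return None
--
--     lowered = normalized.lower()
--
--     for canonical, synonyms in APP_SYNONYMS.items():
--         if lowered == canonical.lower():
--             return canonical
--         for synonym in synonyms:
--             if lowered == synonym.lower():
--                 return canonical
--
--     # Default: return lowercase version if unknown (avoids None -> breakage)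
--     return lowered
-- ===== SOURCE B (Python) =====
-- from typing import Dict, Optional, Tuple
--
-- APP_SYNONYMS: Dict[str, Tuple[str, ...]] = {
--     "HOST": ("host", "hardware", "system"),
--     "ambari_server": ("ambari", "server", "ambari_server"),
--     "namenode": ("namenode", "hdfs", "nn", "name node"),
--     "datanode": ("datanode", "dn", "data node"),
--     "nodemanager": ("nodemanager", "nm", "node manager"),
--     "resourcemanager": ("resourcemanager", "rm", "resource manager", "yarn"),
-- }
--
-- # Precomputed reverse index: every lowered canonical and synonym -> canonical.
-- REVERSE: Dict[str, str] = {}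
-- for _canonical, _synonyms in APP_SYNONYMS.items():
--     REVERSE[_canonical.lower()] = _canonical
--     for _synonym in _synonyms:
--         REVERSE[_synonym.lower()] = _canonical
--
-- def canonicalize_app_id(app_id: Optional[str]) -> Optional[str]:
--     """Return the canonical AMS appId (case-insensitive synonym support)."""
--     if not app_id:
--         return None
--     normalized = app_id.strip()
--     if not normalized:
--         return None
--     lowered = normalized.lower()
--     return REVERSE.get(lowered, lowered)
-- ===== Notes on version B (the rewrite author's own statement) =====
-- stated objective: idiomatic
-- what changed: Replaced A's per-call nested scan over APP_SYNONYMS (lowering each canonical/synonym on every call) by a module-level reverse dict built once, so the function body collapses to the guards plus a single dict lookup.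
import Mathlib
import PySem

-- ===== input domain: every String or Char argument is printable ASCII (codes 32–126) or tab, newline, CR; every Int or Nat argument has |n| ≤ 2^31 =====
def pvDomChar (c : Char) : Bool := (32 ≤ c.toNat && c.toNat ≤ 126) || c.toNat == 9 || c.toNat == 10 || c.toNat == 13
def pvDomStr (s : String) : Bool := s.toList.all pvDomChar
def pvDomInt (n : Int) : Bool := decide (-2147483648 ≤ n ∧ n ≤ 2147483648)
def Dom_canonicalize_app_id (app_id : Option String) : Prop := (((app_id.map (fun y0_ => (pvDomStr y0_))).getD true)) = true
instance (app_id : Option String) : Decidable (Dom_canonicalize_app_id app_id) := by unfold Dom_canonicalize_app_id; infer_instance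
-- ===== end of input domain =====

-- B replaces A's per-call nested scan over APP_SYNONYMS by a reverse index built once
-- at module level, so the function body is a single dict lookup (objective: idiomatic).

-- ===== PORT A =====
-- APP_SYNONYMS, in Python dict insertion order
def appSynonymsA : List (String × List String) :=
  [("HOST", ["host", "hardware", "system"]),
   ("ambari_server", ["ambari", "server", "ambari_server"]),
   ("namenode", ["namenode", "hdfs", "nn", "name node"]),
   ("datanode", ["datanode", "dn", "data node"]),
   ("nodemanager", ["nodemanager", "nm", "node manager"]),
   ("resourcemanager", ["resourcemanager", "rm", "resource manager", "yarn"])]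

-- inner loop: 'for synonym in synonyms: if lowered == synonym.lower(): return canonical'
def scanSynonyms (lowered canonical : String) : List String → Option String
  | [] => none
  | s :: rest =>
    if lowered == PySem.Str.lower s then some canonical
    else scanSynonyms lowered canonical rest

-- outer loop: 'for canonical, synonyms in APP_SYNONYMS.items(): …'
def scanApp (lowered : String) : List (String × List String) → Option String
  | [] => none
  | (c, syns) :: rest =>
    if lowered == PySem.Str.lower c then some c
    else
      match scanSynonyms lowered c syns with
      | some r => some r
      | none => scanApp lowered rest

def canonicalize_app_id (app_id : Option String) : Option String :=
  match app_id with
  | none => none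
  | some s =>
    if s == "" then none                       -- 'if not app_id'
    else
      if PySem.Str.strip s == "" then none
      else
        match scanApp (PySem.Str.lower (PySem.Str.strip s)) appSynonymsA with
        | some c => some c
        | none => some (PySem.Str.lower (PySem.Str.strip s))  -- default: lowercase version

-- ===== PORT B =====
-- module-level reverse index over the same APP_SYNONYMS table:
-- lowered canonical and every lowered synonym -> canonical
def reverseIndex : PySem.Dict String String :=
  appSynonymsA.foldl
    (fun d p =>
      (p.2.foldl (fun d s => d.insert (PySem.Str.lower s) p.1)
        (d.insert (PySem.Str.lower p.1) p.1)))
    PySem.Dict.empty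

def canonicalize_app_id_alt (app_id : Option String) : Option String :=
  match app_id with
  | none => none
  | some s =>
    if s == "" then none
    else
      if PySem.Str.strip s == "" then none
      else
        some (reverseIndex.getD (PySem.Str.lower (PySem.Str.strip s))
          (PySem.Str.lower (PySem.Str.strip s)))

-- ===== PRECONDITION & SPEC =====
def Spec_canonicalize_app_id (app_id : Option String) (out : Option String) : Prop := out = canonicalize_app_id_alt app_id
instance (app_id : Option String) (out : Option String) : Decidable (Spec_canonicalize_app_id app_id out) := by unfold Spec_canonicalize_app_id; infer_instance

-- ===== CLAIM (what is proved, stated in full; the proofs are below) =====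
def Claim_equal_canonicalize_app_id : Prop := ∀ (app_id : Option String), Dom_canonicalize_app_id app_id → Spec_canonicalize_app_id app_id (canonicalize_app_id app_id)

-- ===== LEMMAS AND PROOFS =====
-- lowercase evaluations of the catalog literals
lemma lower_HOST : PySem.Str.lower "HOST" = "host" := by decide
lemma lower_host : PySem.Str.lower "host" = "host" := by decide
lemma lower_hardware : PySem.Str.lower "hardware" = "hardware" := by decide
lemma lower_system : PySem.Str.lower "system" = "system" := by decide
lemma lower_ambari_server : PySem.Str.lower "ambari_server" = "ambari_server" := by decide
lemma lower_ambari : PySem.Str.lower "ambari" = "ambari" := by decide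
lemma lower_server : PySem.Str.lower "server" = "server" := by decide
lemma lower_namenode : PySem.Str.lower "namenode" = "namenode" := by decide
lemma lower_hdfs : PySem.Str.lower "hdfs" = "hdfs" := by decide
lemma lower_nn : PySem.Str.lower "nn" = "nn" := by decide
lemma lower_name_node : PySem.Str.lower "name node" = "name node" := by decide
lemma lower_datanode : PySem.Str.lower "datanode" = "datanode" := by decide
lemma lower_dn : PySem.Str.lower "dn" = "dn" := by decide
lemma lower_data_node : PySem.Str.lower "data node" = "data node" := by decide
lemma lower_nodemanager : PySem.Str.lower "nodemanager" = "nodemanager" := by decide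
lemma lower_nm : PySem.Str.lower "nm" = "nm" := by decide
lemma lower_node_manager : PySem.Str.lower "node manager" = "node manager" := by decide
lemma lower_resourcemanager : PySem.Str.lower "resourcemanager" = "resourcemanager" := by decide
lemma lower_rm : PySem.Str.lower "rm" = "rm" := by decide
lemma lower_resource_manager : PySem.Str.lower "resource manager" = "resource manager" := by decide
lemma lower_yarn : PySem.Str.lower "yarn" = "yarn" := by decide

-- the reverse index evaluates to this literal association dict
lemma reverseIndex_eval : reverseIndex = PySem.Dict.mk
  [("host", "HOST"), ("hardware", "HOST"), ("system", "HOST"),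
   ("ambari_server", "ambari_server"), ("ambari", "ambari_server"), ("server", "ambari_server"),
   ("namenode", "namenode"), ("hdfs", "namenode"), ("nn", "namenode"), ("name node", "namenode"),
   ("datanode", "datanode"), ("dn", "datanode"), ("data node", "datanode"),
   ("nodemanager", "nodemanager"), ("nm", "nodemanager"), ("node manager", "nodemanager"),
   ("resourcemanager", "resourcemanager"), ("rm", "resourcemanager"),
   ("resource manager", "resourcemanager"), ("yarn", "resourcemanager")] := by decide

-- orient A's comparisons 'w == k' as the dict lookup's 'k == w'
lemma beqc_host (w : String) : (w == "host") = ("host" == w) := by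
  rw [Bool.eq_iff_iff, beq_iff_eq, beq_iff_eq]; exact eq_comm
lemma beqc_hardware (w : String) : (w == "hardware") = ("hardware" == w) := by
  rw [Bool.eq_iff_iff, beq_iff_eq, beq_iff_eq]; exact eq_comm
lemma beqc_system (w : String) : (w == "system") = ("system" == w) := by
  rw [Bool.eq_iff_iff, beq_iff_eq, beq_iff_eq]; exact eq_comm
lemma beqc_ambari_server (w : String) : (w == "ambari_server") = ("ambari_server" == w) := by
  rw [Bool.eq_iff_iff, beq_iff_eq, beq_iff_eq]; exact eq_comm
lemma beqc_ambari (w : String) : (w == "ambari") = ("ambari" == w) := by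
  rw [Bool.eq_iff_iff, beq_iff_eq, beq_iff_eq]; exact eq_comm
lemma beqc_server (w : String) : (w == "server") = ("server" == w) := by
  rw [Bool.eq_iff_iff, beq_iff_eq, beq_iff_eq]; exact eq_comm
lemma beqc_namenode (w : String) : (w == "namenode") = ("namenode" == w) := by
  rw [Bool.eq_iff_iff, beq_iff_eq, beq_iff_eq]; exact eq_comm
lemma beqc_hdfs (w : String) : (w == "hdfs") = ("hdfs" == w) := by
  rw [Bool.eq_iff_iff, beq_iff_eq, beq_iff_eq]; exact eq_comm
lemma beqc_nn (w : String) : (w == "nn") = ("nn" == w) := by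
  rw [Bool.eq_iff_iff, beq_iff_eq, beq_iff_eq]; exact eq_comm
lemma beqc_name_node (w : String) : (w == "name node") = ("name node" == w) := by
  rw [Bool.eq_iff_iff, beq_iff_eq, beq_iff_eq]; exact eq_comm
lemma beqc_datanode (w : String) : (w == "datanode") = ("datanode" == w) := by
  rw [Bool.eq_iff_iff, beq_iff_eq, beq_iff_eq]; exact eq_comm
lemma beqc_dn (w : String) : (w == "dn") = ("dn" == w) := by
  rw [Bool.eq_iff_iff, beq_iff_eq, beq_iff_eq]; exact eq_comm
lemma beqc_data_node (w : String) : (w == "data node") = ("data node" == w) := by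
  rw [Bool.eq_iff_iff, beq_iff_eq, beq_iff_eq]; exact eq_comm
lemma beqc_nodemanager (w : String) : (w == "nodemanager") = ("nodemanager" == w) := by
  rw [Bool.eq_iff_iff, beq_iff_eq, beq_iff_eq]; exact eq_comm
lemma beqc_nm (w : String) : (w == "nm") = ("nm" == w) := by
  rw [Bool.eq_iff_iff, beq_iff_eq, beq_iff_eq]; exact eq_comm
lemma beqc_node_manager (w : String) : (w == "node manager") = ("node manager" == w) := by
  rw [Bool.eq_iff_iff, beq_iff_eq, beq_iff_eq]; exact eq_comm
lemma beqc_resourcemanager (w : String) : (w == "resourcemanager") = ("resourcemanager" == w) := by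
  rw [Bool.eq_iff_iff, beq_iff_eq, beq_iff_eq]; exact eq_comm
lemma beqc_rm (w : String) : (w == "rm") = ("rm" == w) := by
  rw [Bool.eq_iff_iff, beq_iff_eq, beq_iff_eq]; exact eq_comm
lemma beqc_resource_manager (w : String) : (w == "resource manager") = ("resource manager" == w) := by
  rw [Bool.eq_iff_iff, beq_iff_eq, beq_iff_eq]; exact eq_comm
lemma beqc_yarn (w : String) : (w == "yarn") = ("yarn" == w) := by
  rw [Bool.eq_iff_iff, beq_iff_eq, beq_iff_eq]; exact eq_comm

-- A's nested scan produces exactly B's reverse-index lookup, for every string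
set_option maxHeartbeats 2000000 in
lemma key_lookup (w : String) :
    (match scanApp w appSynonymsA with
     | some c => some c
     | none => some w) = some (reverseIndex.getD w w) := by
  rw [reverseIndex_eval]
  simp only [scanApp, scanSynonyms, appSynonymsA,
    lower_HOST, lower_host, lower_hardware, lower_system,
    lower_ambari_server, lower_ambari, lower_server,
    lower_namenode, lower_hdfs, lower_nn, lower_name_node,
    lower_datanode, lower_dn, lower_data_node,
    lower_nodemanager, lower_nm, lower_node_manager,
    lower_resourcemanager, lower_rm, lower_resource_manager, lower_yarn,
    PySem.Dict.getD_eq_get?_getD, PySem.Dict.get?_mk_cons,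
    beqc_host, beqc_hardware, beqc_system, beqc_ambari_server, beqc_ambari, beqc_server, beqc_namenode, beqc_hdfs, beqc_nn, beqc_name_node, beqc_datanode, beqc_dn, beqc_data_node, beqc_nodemanager, beqc_nm, beqc_node_manager, beqc_resourcemanager, beqc_rm, beqc_resource_manager, beqc_yarn]
  by_cases h0 : ("host" == w) = true
  · simp only [if_pos h0]; rfl
  · simp only [if_neg h0]
    by_cases h1 : ("hardware" == w) = true
    · simp only [if_pos h1]; rfl
    · simp only [if_neg h1]
      by_cases h2 : ("system" == w) = true
      · simp only [if_pos h2]; rfl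
      · simp only [if_neg h2]
        by_cases h3 : ("ambari_server" == w) = true
        · simp only [if_pos h3]; rfl
        · simp only [if_neg h3]
          by_cases h4 : ("ambari" == w) = true
          · simp only [if_pos h4]; rfl
          · simp only [if_neg h4]
            by_cases h5 : ("server" == w) = true
            · simp only [if_pos h5]; rfl
            · simp only [if_neg h5]
              by_cases h6 : ("namenode" == w) = true
              · simp only [if_pos h6]; rfl
              · simp only [if_neg h6]
                by_cases h7 : ("hdfs" == w) = true
                · simp only [if_pos h7]; rfl
                · simp only [if_neg h7]
                  by_cases h8 : ("nn" == w) = true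
                  · simp only [if_pos h8]; rfl
                  · simp only [if_neg h8]
                    by_cases h9 : ("name node" == w) = true
                    · simp only [if_pos h9]; rfl
                    · simp only [if_neg h9]
                      by_cases h10 : ("datanode" == w) = true
                      · simp only [if_pos h10]; rfl
                      · simp only [if_neg h10]
                        by_cases h11 : ("dn" == w) = true
                        · simp only [if_pos h11]; rfl
                        · simp only [if_neg h11]
                          by_cases h12 : ("data node" == w) = true
                          · simp only [if_pos h12]; rfl
                          · simp only [if_neg h12]
                            by_cases h13 : ("nodemanager" == w) = true
                            · simp only [if_pos h13]; rfl
                            · simp only [if_neg h13]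
                              by_cases h14 : ("nm" == w) = true
                              · simp only [if_pos h14]; rfl
                              · simp only [if_neg h14]
                                by_cases h15 : ("node manager" == w) = true
                                · simp only [if_pos h15]; rfl
                                · simp only [if_neg h15]
                                  by_cases h16 : ("resourcemanager" == w) = true
                                  · simp only [if_pos h16]; rfl
                                  · simp only [if_neg h16]
                                    by_cases h17 : ("rm" == w) = true
                                    · simp only [if_pos h17]; rfl
                                    · simp only [if_neg h17]
                                      by_cases h18 : ("resource manager" == w) = true
                                      · simp only [if_pos h18]; rfl
                                      · simp only [if_neg h18]
                                        by_cases h19 : ("yarn" == w) = true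
                                        · simp only [if_pos h19]; rfl
                                        · simp only [if_neg h19]
                                          rfl

-- ===== VERDICT (by name: the statement is the Claim_ definition above) =====
set_option maxHeartbeats 1000000 in
theorem canonicalize_app_id_spec : Claim_equal_canonicalize_app_id := by
  intro app_id _
  unfold Spec_canonicalize_app_id canonicalize_app_id canonicalize_app_id_alt
  cases app_id with
  | none => rfl
  | some s =>
    by_cases h1 : (s == "") = true
    · simp only [if_pos h1]
    · simp only [if_neg h1]
      by_cases h2 : (PySem.Str.strip s == "") = true
      · simp only [if_pos h2]
      · simp only [if_neg h2]
        exact key_lookup (PySem.Str.lower (PySem.Str.strip s))
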